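/- GENERATED by farm/mkstatement.py from design/units.tsv (unit `DGifBufferedInput.COMPOSITION`) and the Specs of Gif/Spec/*.lean — do not edit.
   THE STATEMENT of the proof unit `DGifBufferedInput.COMPOSITION`: the function `DGifBufferedInput` (84 instructions) satisfies its contract,
   GIVEN THE STATEMENTS OF ITS 4 SEGMENTS (`Gif.Spec.DGifBufferedInput.Seg<k> Lay μ u₀`: what the unit `DGifBufferedInput.<k>` proves).
   No machine code is walked: `ReachVia.trans` along the segments (the exit assertion of a segment is the entry assertion of
   its successor), an induction on the loop measures. What the names mean: ProgX/Base/Spec/Basic.lean. The theorem to prove: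
   `theorem DGifBufferedInput_COMPOSITION_ok : Gif.Spec.DGifBufferedInput_COMPOSITION.Statement`. -/
import Gif.Code
import Gif.Dec.All
import Gif.Labels
import Gif.Spec.Reader
import Gif.Spec.Seg_DGifBufferedInput
namespace Gif.Spec.DGifBufferedInput_COMPOSITION
open X86 X86.User Asan

/-- The statement of unit `DGifBufferedInput.COMPOSITION`. -/
def Statement : Prop :=
  ∀ (Lay : Layout) (_hLay : Lay.hi = 0x1000000) (μ : Microarch) (_hμ : UserX.MicroOK μ) (u₀ : State)
    (_h_DGifBufferedInput_1 : Gif.Spec.DGifBufferedInput.Seg1 Lay μ u₀)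
    (_h_DGifBufferedInput_2 : Gif.Spec.DGifBufferedInput.Seg2 Lay μ u₀)
    (_h_DGifBufferedInput_3 : Gif.Spec.DGifBufferedInput.Seg3 Lay μ u₀)
    (_h_DGifBufferedInput_E : Gif.Spec.DGifBufferedInput.SegE Lay μ u₀),
    ∀ (H : Heap) (rest : List Obj) (frames : List (Nat × FrameLayout)) (F : Forest) (R : Rd), Calls Lay μ ProgX.Base.WayInv (ProgX.Base.conv u₀) Gif.L.DGifBufferedInput.entry (Gif.Spec.DGifBufferedInput.spec H rest frames F R)

end Gif.Spec.DGifBufferedInput_COMPOSITION
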